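-- pv_equiv track=rewrite | github.com/miny-genie/BOJ | acmicpc_2961.py | compute_min_diff
-- ===== SOURCE A (Python) =====
-- def compute_min_diff(sour_grades: list, bitter_grades: list) -> int:
--     ingredient_count = len(sour_grades)
--     max_num = 2 ** ingredient_count - 1
--     bit_length = len(bin(max_num)[2:])
--     min_diff = float('inf')
--
--     for i in range(1, max_num+1):
--         sour_diff = 1
--         bitt_diff = 0
--         for idx, digit in enumerate(map(int, bin(i)[2:].zfill(bit_length))):
--             if digit:
--                 sour_diff *= sour_grades[idx]
--                 bitt_diff += bitter_grades[idx]
--         min_diff = min(min_diff, abs(sour_diff - bitt_diff))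
--
--     return min_diff
-- ===== SOURCE B (Python) =====
-- def compute_min_diff(sour_grades: list, bitter_grades: list) -> int:
--     # Incremental subset DP: combos holds (product, sum) for every subset of the
--     # ingredients seen so far; each new ingredient doubles it. Each nonempty
--     # subset is visited exactly once, with no per-subset bit decoding.
--     combos = [(1, 0)]
--     best = None
--     for s, b in zip(sour_grades, bitter_grades):
--         new = [(p * s, t + b) for p, t in combos]
--         for p, t in new:
--             d = abs(p - t)
--             if best is None or d < best:
--                 best = d
--         combos = combos + new
--     return best
-- ===== Notes on version B (the rewrite author's own statement) =====
-- stated objective: alternative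
-- what changed: Replaces the per-subset bitmask decoding (bin/zfill/enumerate over n bits for each of the 2^n-1 masks) with an incremental subset DP that doubles a list of (product,sum) pairs once per ingredient, producing every nonempty subset exactly once with O(1) work per subset.
-- outside the precondition, e.g. on compute_min_diff([], []): A returns inf, B returns None; on compute_min_diff([2, 3], [1]): A raises IndexError, B returns 1
import Mathlib
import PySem

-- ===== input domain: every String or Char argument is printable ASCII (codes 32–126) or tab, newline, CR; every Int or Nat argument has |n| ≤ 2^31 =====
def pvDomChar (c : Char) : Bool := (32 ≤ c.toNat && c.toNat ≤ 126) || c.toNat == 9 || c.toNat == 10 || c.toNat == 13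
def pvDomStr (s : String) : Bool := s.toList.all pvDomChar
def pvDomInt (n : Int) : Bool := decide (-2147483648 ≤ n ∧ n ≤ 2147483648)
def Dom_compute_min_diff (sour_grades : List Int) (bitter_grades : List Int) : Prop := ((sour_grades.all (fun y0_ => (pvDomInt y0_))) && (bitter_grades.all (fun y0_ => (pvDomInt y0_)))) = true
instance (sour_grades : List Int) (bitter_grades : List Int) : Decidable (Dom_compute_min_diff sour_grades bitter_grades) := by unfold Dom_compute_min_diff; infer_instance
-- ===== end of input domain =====

-- B replaces A's per-subset bitmask decoding by an incremental subset DP (each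
-- nonempty subset produced exactly once, with no per-subset bit decoding).

-- ===== PORT A =====

-- bin(m)[2:] as a list of 0/1 digits, MSB first (exact for m ≥ 0; the fuel
-- argument only makes the halving recursion structural: m halvings suffice).
def pvBinAux : Nat → Nat → List Nat
  | 0, _ => []
  | _ + 1, 0 => []
  | fuel + 1, m + 1 => pvBinAux fuel ((m + 1) / 2) ++ [(m + 1) % 2]

def pvBin (m : Nat) : List Nat := if m = 0 then [0] else pvBinAux m m

-- the body of A's outer loop: decode bin(i)[2:].zfill(bit_length), fold the inner
-- enumerate loop, then min_diff = min(min_diff, abs(sour_diff - bitt_diff)).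
-- float('inf') is modelled as `none`.  `sour_grades[idx]`/`bitter_grades[idx]` are
-- pyGet? with a .getD 0 that is never taken on inputs where Python does not raise.
def pvStepA (sour_grades bitter_grades : List Int) (bit_length : Nat)
    (min_diff : Option Int) (i : Int) : Option Int :=
  let bits := pvBin i.toNat
  let digits := List.replicate (bit_length - bits.length) 0 ++ bits
  let sb := (PySem.List.enumerate digits 0).foldl
    (fun (sb : Int × Int) (p : Int × Nat) =>
      if p.2 ≠ 0 then
        (sb.1 * (PySem.List.pyGet? sour_grades p.1).getD 0,
         sb.2 + (PySem.List.pyGet? bitter_grades p.1).getD 0)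
      else sb) (1, 0)
  let d := |sb.1 - sb.2|
  match min_diff with
  | none => some d
  | some v => some (if v ≤ d then v else d)

def compute_min_diff (sour_grades : List Int) (bitter_grades : List Int) : Int :=
  let ingredient_count := sour_grades.length
  let max_num := 2 ^ ingredient_count - 1
  let bit_length := (pvBin max_num).length
  -- Python returns float('inf') when the loop is empty (sour_grades = []): not an
  -- Int, excluded by Pre_; the .getD 0 is never taken under Pre_.
  ((PySem.List.pyRange 1 ((max_num : Int) + 1) 1).foldl
      (pvStepA sour_grades bitter_grades bit_length) none).getD 0

-- ===== PORT B =====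

-- one iteration of B's zip loop: double the combo list, update the running best.
def pvStepB (st : List (Int × Int) × Option Int) (sb : Int × Int) :
    List (Int × Int) × Option Int :=
  let new := st.1.map (fun pt => (pt.1 * sb.1, pt.2 + sb.2))
  let best := new.foldl
    (fun (b : Option Int) (pt : Int × Int) =>
      let d := |pt.1 - pt.2|
      match b with
      | none => some d
      | some v => if d < v then some d else some v) st.2
  (st.1 ++ new, best)

def compute_min_diff_alt (sour_grades : List Int) (bitter_grades : List Int) : Int :=
  -- Python's B returns None when zip is empty: excluded by Pre_; .getD 0 never taken there.
  (((sour_grades.zip bitter_grades).foldl pvStepB ([(1, 0)], none)).2).getD 0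

-- ===== PRECONDITION & SPEC =====
-- Pre_ excludes sour_grades = [] (A returns float('inf'), not an int; B returns None)
-- and bitter_grades shorter than sour_grades (A raises IndexError).
def Pre_compute_min_diff (sour_grades : List Int) (bitter_grades : List Int) : Prop :=
  sour_grades ≠ [] ∧ sour_grades.length ≤ bitter_grades.length
instance (sour_grades : List Int) (bitter_grades : List Int) : Decidable (Pre_compute_min_diff sour_grades bitter_grades) := by unfold Pre_compute_min_diff; infer_instance

def pvWitness_compute_min_diff : List Int × List Int := ([2, 3], [1, 5])

def Spec_compute_min_diff (sour_grades : List Int) (bitter_grades : List Int) (out : Int) : Prop := out = compute_min_diff_alt sour_grades bitter_grades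
instance (sour_grades : List Int) (bitter_grades : List Int) (out : Int) : Decidable (Spec_compute_min_diff sour_grades bitter_grades out) := by unfold Spec_compute_min_diff; infer_instance

-- ===== CLAIM (what is proved, stated in full; the proofs are below) =====
def Claim_equal_compute_min_diff : Prop := ∀ (sour_grades : List Int) (bitter_grades : List Int), Dom_compute_min_diff sour_grades bitter_grades → Pre_compute_min_diff sour_grades bitter_grades → Spec_compute_min_diff sour_grades bitter_grades (compute_min_diff sour_grades bitter_grades)

-- ===== LEMMAS AND PROOFS =====

-- Common skeleton: pvF ps enumerates (product, sum) over ALL subsets of the pair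
-- list ps, empty subset first; A visits pvF pairs in mask order, B visits
-- pvF pairs.reverse; a permutation argument links the two min-folds.

def pvApl (p q : Int × Int) : Int × Int := (q.1 * p.1, q.2 + p.2)

def pvF : List (Int × Int) → List (Int × Int)
  | [] => [(1, 0)]
  | p :: l => pvF l ++ (pvF l).map (pvApl p)

def pvVal (q : Int × Int) : Int := |q.1 - q.2|

def pvG (b : Option Int) (d : Int) : Option Int :=
  match b with
  | none => some d
  | some v => some (if v ≤ d then v else d)

-- binary digits of i, MSB first, fixed width w
def pvBitsW : Nat → Nat → List Nat
  | 0, _ => []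
  | w + 1, i => pvBitsW w (i / 2) ++ [i % 2]

def pvInStep (sb : Int × Int) (dp : Nat × (Int × Int)) : Int × Int :=
  if dp.1 ≠ 0 then (sb.1 * dp.2.1, sb.2 + dp.2.2) else sb

def pvInner (l : List (Nat × (Int × Int))) : Int × Int := l.foldl pvInStep (1, 0)

-- ---- pvBin facts ----

lemma pvBinAux_fuel : ∀ fuel fuel' m, m ≤ fuel → m ≤ fuel' →
    pvBinAux fuel m = pvBinAux fuel' m := by
  intro fuel
  induction fuel with
  | zero =>
    intro fuel' m hm _
    interval_cases m
    cases fuel' <;> rfl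
  | succ f ih =>
    intro fuel' m hm hm'
    match m, fuel' with
    | 0, fuel' => cases fuel' <;> rfl
    | m + 1, f' + 1 =>
      simp only [pvBinAux]
      rw [ih f' ((m+1)/2) (by omega) (by omega)]

lemma pvBin_rec (m : Nat) (hm : 1 ≤ m) :
    pvBinAux m m = pvBinAux (m / 2) (m / 2) ++ [m % 2] := by
  match m, hm with
  | m + 1, _ =>
    simp only [pvBinAux]
    rw [pvBinAux_fuel m ((m+1)/2) ((m+1)/2) (by omega) le_rfl]

lemma pvBin_pos (m : Nat) (hm : 1 ≤ m) : pvBin m = pvBinAux m m := by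
  unfold pvBin
  rw [if_neg (by omega)]

lemma pvBin_len_le : ∀ (w i : Nat), i < 2 ^ w → (pvBinAux i i).length ≤ w := by
  intro w
  induction w with
  | zero => intro i hi; interval_cases i; simp [pvBinAux]
  | succ w ih =>
    intro i hi
    match i with
    | 0 => simp [pvBinAux]
    | i + 1 =>
      rw [pvBin_rec (i+1) (by omega)]
      have h2 : (i+1)/2 < 2 ^ w := by omega
      have := ih ((i+1)/2) h2
      simp only [List.length_append, List.length_singleton]
      omega

lemma pvBin_len_pow (n : Nat) (hn : 1 ≤ n) : (pvBin (2 ^ n - 1)).length = n := by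
  induction n with
  | zero => omega
  | succ n ih =>
    rcases Nat.eq_zero_or_pos n with h | h
    · subst h; rfl
    · have hp : (2:Nat) ≤ 2 ^ n := by
        calc (2:Nat) = 2 ^ 1 := rfl
        _ ≤ 2 ^ n := Nat.pow_le_pow_right (by omega) h
      have hpow : 2 ^ (n+1) = 2 * 2 ^ n := by ring
      have hm : 1 ≤ 2 ^ (n+1) - 1 := by omega
      rw [pvBin_pos _ hm, pvBin_rec _ hm]
      have hdiv : (2 ^ (n+1) - 1) / 2 = 2 ^ n - 1 := by omega
      rw [hdiv, ← pvBin_pos _ (by omega)]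
      simp only [List.length_append, List.length_singleton, ih h]

lemma pvBitsW_length (w : Nat) : ∀ i, (pvBitsW w i).length = w := by
  induction w with
  | zero => intro i; rfl
  | succ w ih => intro i; simp [pvBitsW, ih]

lemma pvBitsW_zero (w : Nat) : pvBitsW w 0 = List.replicate w 0 := by
  induction w with
  | zero => rfl
  | succ w ih => simp [pvBitsW, ih, List.replicate_succ' ]

lemma pvBitsW_low : ∀ (w i : Nat), i < 2 ^ w → pvBitsW (w + 1) i = 0 :: pvBitsW w i := by
  intro w
  induction w with
  | zero => intro i hi; interval_cases i; rfl
  | succ w ih =>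
    intro i hi
    show pvBitsW (w + 1) (i / 2) ++ [i % 2] = 0 :: pvBitsW (w + 1) i
    rw [ih (i/2) (by omega)]
    simp [pvBitsW]

lemma pvBitsW_high : ∀ (w j : Nat), j < 2 ^ w →
    pvBitsW (w + 1) (2 ^ w + j) = 1 :: pvBitsW w j := by
  intro w
  induction w with
  | zero => intro j hj; interval_cases j; rfl
  | succ w ih =>
    intro j hj
    show pvBitsW (w + 1) ((2 ^ (w + 1) + j) / 2) ++ [(2 ^ (w + 1) + j) % 2] = 1 :: pvBitsW (w + 1) j
    have h2 : 2 ^ (w + 1) = 2 * 2 ^ w := by ring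
    have hdiv : (2 ^ (w + 1) + j) / 2 = 2 ^ w + j / 2 := by omega
    have hmod : (2 ^ (w + 1) + j) % 2 = j % 2 := by omega
    rw [hdiv, hmod, ih (j/2) (by omega)]
    simp [pvBitsW]

lemma pvBitsW_eq_pad (w : Nat) : ∀ i, 1 ≤ i → i < 2 ^ w →
    pvBitsW w i = List.replicate (w - (pvBinAux i i).length) 0 ++ pvBinAux i i := by
  induction w with
  | zero => intro i h1 h2; omega
  | succ w ih =>
    intro i h1 h2
    rw [pvBin_rec i h1]
    show pvBitsW w (i / 2) ++ [i % 2] = _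
    rcases Nat.lt_or_ge i 2 with hi | hi
    · have : i = 1 := by omega
      subst this
      have h0 : (1:Nat) / 2 = 0 := rfl
      rw [h0, pvBitsW_zero]
      simp [pvBinAux]
    · have hd1 : 1 ≤ i / 2 := by omega
      have hd2 : i / 2 < 2 ^ w := by omega
      rw [ih (i/2) hd1 hd2]
      have hlen : (pvBinAux (i/2) (i/2)).length ≤ w := pvBin_len_le w (i/2) hd2
      have : w + 1 - (pvBinAux (i/2) (i/2) ++ [i % 2]).length = w - (pvBinAux (i/2) (i/2)).length := by
        simp only [List.length_append, List.length_singleton]; omega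
      rw [this, List.append_assoc]

-- ---- inner loop facts ----

lemma pvInner_init : ∀ (l : List (Nat × (Int × Int))) (a b : Int),
    l.foldl pvInStep (a, b) = (a * (pvInner l).1, b + (pvInner l).2) := by
  intro l
  induction l with
  | nil => intro a b; simp [pvInner]
  | cons dp l ih =>
    intro a b
    simp only [pvInner, List.foldl_cons] at *
    by_cases h : dp.1 ≠ 0
    · simp only [pvInStep, if_pos h]
      rw [ih, ih (1 * dp.2.1) (0 + dp.2.2)]
      simp only [Prod.mk.injEq]
      constructor <;> ring
    · simp only [pvInStep, if_neg h]
      exact ih a b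

-- A's enumerate loop with list indexing = pvInStep-fold over the zipped triple
lemma pvEnum_fold (sour bitter : List Int) :
    ∀ (digits : List Nat) (k : Nat) (sb : Int × Int),
      k + digits.length ≤ sour.length → k + digits.length ≤ bitter.length →
      (PySem.List.enumerate digits (k : Int)).foldl
        (fun (sb : Int × Int) (p : Int × Nat) =>
          if p.2 ≠ 0 then
            (sb.1 * (PySem.List.pyGet? sour p.1).getD 0,
             sb.2 + (PySem.List.pyGet? bitter p.1).getD 0)
          else sb) sb
      = (digits.zip ((sour.drop k).zip (bitter.drop k))).foldl pvInStep sb := by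
  intro digits
  induction digits with
  | nil => intro k sb _ _; simp [PySem.List.enumerate_nil]
  | cons d rest ih =>
    intro k sb hs hb
    have hks : k < sour.length := by simp at hs; omega
    have hkb : k < bitter.length := by simp at hb; omega
    rw [PySem.List.enumerate_cons]
    rw [List.drop_eq_getElem_cons hks, List.drop_eq_getElem_cons hkb]
    simp only [List.zip_cons_cons, List.foldl_cons]
    have hcast : (k : Int) + 1 = ((k + 1 : Nat) : Int) := by push_cast; ring
    have hgs : (PySem.List.pyGet? sour (k : Int)).getD 0 = sour[k] := by
      rw [PySem.List.pyGet?_natCast, List.getElem?_eq_getElem hks, Option.getD_some]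
    have hgb : (PySem.List.pyGet? bitter (k : Int)).getD 0 = bitter[k] := by
      rw [PySem.List.pyGet?_natCast, List.getElem?_eq_getElem hkb, Option.getD_some]
    have hstep : (if d ≠ 0 then
        (sb.1 * (PySem.List.pyGet? sour (k : Int)).getD 0,
         sb.2 + (PySem.List.pyGet? bitter (k : Int)).getD 0) else sb)
        = pvInStep sb (d, sour[k], bitter[k]) := by
      simp only [pvInStep, hgs, hgb]
    simp only [hstep, hcast]
    exact ih (k + 1) _ (by simp at hs ⊢; omega) (by simp at hb ⊢; omega)

-- ---- pvF facts ----

lemma pvF_head : ∀ l : List (Int × Int), pvF l = (1, 0) :: (pvF l).tail := by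
  intro l
  induction l with
  | nil => rfl
  | cons p l ih =>
    show pvF l ++ (pvF l).map (pvApl p) = (1, 0) :: (pvF l ++ (pvF l).map (pvApl p)).tail
    rw [ih]
    rfl

lemma pvApl_comm (x y : Int × Int) (q : Int × Int) :
    pvApl x (pvApl y q) = pvApl y (pvApl x q) := by
  simp only [pvApl, Prod.mk.injEq]
  constructor <;> ring

lemma pvF_perm : ∀ {l₁ l₂ : List (Int × Int)}, l₁.Perm l₂ → (pvF l₁).Perm (pvF l₂) := by
  intro l1 l2 h
  induction h with
  | nil => exact List.Perm.refl _
  | cons x _ ih =>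
    exact ih.append (ih.map (pvApl x))
  | swap x y l =>
    show ((pvF l ++ (pvF l).map (pvApl x)) ++ (pvF l ++ (pvF l).map (pvApl x)).map (pvApl y)).Perm
      ((pvF l ++ (pvF l).map (pvApl y)) ++ (pvF l ++ (pvF l).map (pvApl y)).map (pvApl x))
    simp only [List.map_append, List.map_map]
    have hc : ((pvF l).map (pvApl y)).map (pvApl x) = ((pvF l).map (pvApl x)).map (pvApl y) := by
      simp only [List.map_map]
      exact List.map_congr_left (fun q _ => pvApl_comm x y q)
    simp only [List.map_map] at hc
    rw [hc]
    simp only [← List.append_assoc]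
    refine List.Perm.append ?_ (List.Perm.refl _)
    simp only [List.append_assoc]
    exact List.Perm.append_left _ (List.perm_append_comm)
  | trans _ _ ih1 ih2 => exact ih1.trans ih2

-- the core enumeration lemma: masks 0..2^n-1 in numeric order produce pvF pairs
lemma pvMap_range : ∀ (pairs : List (Int × Int)),
    (List.range (2 ^ pairs.length)).map
      (fun i => pvInner ((pvBitsW pairs.length i).zip pairs)) = pvF pairs := by
  intro pairs
  induction pairs with
  | nil => rfl
  | cons p l ih =>
    have hsplit : 2 ^ (p :: l).length = 2 ^ l.length + 2 ^ l.length := by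
      simp [List.length_cons]; ring
    rw [hsplit, List.range_add, List.map_append, List.map_map]
    have hlen : (p :: l).length = l.length + 1 := rfl
    have hfst : (List.range (2 ^ l.length)).map
        (fun i => pvInner ((pvBitsW (p :: l).length i).zip (p :: l))) = pvF l := by
      rw [← ih]
      refine List.map_congr_left (fun i hi => ?_)
      have hi' : i < 2 ^ l.length := List.mem_range.mp hi
      rw [hlen, pvBitsW_low l.length i hi']
      simp only [List.zip_cons_cons, pvInner, List.foldl_cons, pvInStep]
      simp
    have hsnd : (List.range (2 ^ l.length)).map
        ((fun i => pvInner ((pvBitsW (p :: l).length i).zip (p :: l))) ∘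
          (fun i => 2 ^ l.length + i)) = (pvF l).map (pvApl p) := by
      rw [← ih, List.map_map]
      refine List.map_congr_left (fun i hi => ?_)
      have hi' : i < 2 ^ l.length := List.mem_range.mp hi
      simp only [Function.comp_apply]
      rw [hlen, pvBitsW_high l.length i hi']
      simp only [List.zip_cons_cons, pvInner, List.foldl_cons]
      have h1 : pvInStep (1, 0) (1, p) = (1 * p.1, 0 + p.2) := by simp [pvInStep]
      rw [h1, pvInner_init ((pvBitsW l.length i).zip l) (1 * p.1) (0 + p.2)]
      simp only [pvApl, pvInner, Prod.mk.injEq]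
      constructor <;> ring
    rw [hfst, hsnd]
    rfl

-- ---- fold-min facts ----

lemma pvG_comm (z : Option Int) (x y : Int) : pvG (pvG z x) y = pvG (pvG z y) x := by
  cases z with
  | none => simp only [pvG]; split_ifs <;> simp <;> omega
  | some v => simp only [pvG]; split_ifs <;> simp <;> omega

lemma pvG_perm {l₁ l₂ : List Int} (h : l₁.Perm l₂) (b : Option Int) :
    l₁.foldl pvG b = l₂.foldl pvG b := by
  exact h.foldl_eq' (fun x _ y _ z => pvG_comm z x y) b

-- ---- B characterization ----

lemma pvB_char : ∀ (pr : List (Int × Int)),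
    pr.foldl pvStepB ([(1, 0)], none)
      = (pvF pr.reverse, ((pvF pr.reverse).tail.map pvVal).foldl pvG none) := by
  intro pr
  induction pr using List.reverseRecOn with
  | nil => rfl
  | append_singleton l p ih =>
    rw [List.foldl_append, ih]
    have hrev : (l ++ [p]).reverse = p :: l.reverse := by simp
    rw [hrev]
    have hF : pvF (p :: l.reverse) = pvF l.reverse ++ (pvF l.reverse).map (pvApl p) := rfl
    have hmap : (pvF l.reverse).map (fun pt => (pt.1 * p.1, pt.2 + p.2))
        = (pvF l.reverse).map (pvApl p) := rfl
    simp only [List.foldl_cons, List.foldl_nil, pvStepB, hmap]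
    refine Prod.ext rfl ?_
    show ((pvF l.reverse).map (pvApl p)).foldl _ _ = _
    have hupd : ∀ (b : Option Int) (pt : Int × Int),
        (match b with
          | none => some |pt.1 - pt.2|
          | some v => if |pt.1 - pt.2| < v then some |pt.1 - pt.2| else some v) = pvG b (pvVal pt) := by
      intro b pt
      cases b with
      | none => rfl
      | some v => simp only [pvG, pvVal]; split_ifs <;> simp only [Option.some.injEq] <;> omega
    have hext := List.foldl_ext
      (fun (b : Option Int) (pt : Int × Int) =>
        match b with
        | none => some |pt.1 - pt.2|
        | some v => if |pt.1 - pt.2| < v then some |pt.1 - pt.2| else some v)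
      (fun (b : Option Int) (pt : Int × Int) => pvG b (pvVal pt))
      ((List.map pvVal (pvF l.reverse).tail).foldl pvG none)
      (l := (pvF l.reverse).map (pvApl p)) (fun b pt _ => hupd b pt)
    rw [hext, List.foldl_map]
    have ht : (pvF (p :: l.reverse)).tail
        = (pvF l.reverse).tail ++ (pvF l.reverse).map (pvApl p) := by
      show (pvF l.reverse ++ (pvF l.reverse).map (pvApl p)).tail = _
      rw [pvF_head l.reverse]
      rfl
    rw [ht, List.map_append, List.foldl_append]
    simp only [List.map_map, List.foldl_map]
    rfl

-- ---- A characterization ----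

lemma pvA_char (sour bitter : List Int) (hne : sour ≠ [])
    (hle : sour.length ≤ bitter.length) :
    compute_min_diff sour bitter
      = (((pvF (sour.zip bitter)).tail.map pvVal).foldl pvG none).getD 0 := by
  have hn : 1 ≤ sour.length := List.length_pos_of_ne_nil hne
  set n := sour.length with hn_def
  set pairs := sour.zip bitter with hpairs
  have hplen : pairs.length = n := by
    rw [hpairs, List.length_zip]
    omega
  have hp1 : (1:Nat) ≤ 2 ^ n := Nat.one_le_two_pow
  have hbl : (pvBin (2 ^ n - 1)).length = n := pvBin_len_pow n hn
  show ((PySem.List.pyRange 1 (((2 ^ n - 1 : Nat) : Int) + 1) 1).foldl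
      (pvStepA sour bitter (pvBin (2 ^ n - 1)).length) none).getD 0 = _
  rw [hbl]
  have hcast : ((2 ^ n - 1 : Nat) : Int) + 1 = ((2 ^ n : Nat) : Int) := by omega
  rw [hcast, PySem.List.pyRange_one]
  have htn : (((2 ^ n : Nat) : Int) - 1).toNat = 2 ^ n - 1 := by omega
  rw [htn, List.foldl_map]
  -- each loop body application is pvG applied to the subset value
  have hstep : ∀ (md : Option Int), ∀ k ∈ List.range (2 ^ n - 1),
      pvStepA sour bitter n md (1 + (k : Int))
        = pvG md (pvVal (pvInner ((pvBitsW n (k + 1)).zip pairs))) := by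
    intro md k hk
    have hk' : k < 2 ^ n - 1 := List.mem_range.mp hk
    have htoNat : ((1 : Int) + (k : Int)).toNat = k + 1 := by omega
    simp only [pvStepA, htoNat]
    have hbits : pvBin (k + 1) = pvBinAux (k + 1) (k + 1) := pvBin_pos (k + 1) (by omega)
    have hdig : List.replicate (n - (pvBin (k + 1)).length) 0 ++ pvBin (k + 1)
        = pvBitsW n (k + 1) := by
      rw [hbits, ← pvBitsW_eq_pad n (k + 1) (by omega) (by omega)]
    rw [hdig]
    have henum := pvEnum_fold sour bitter (pvBitsW n (k + 1)) 0 (1, 0)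
      (by rw [pvBitsW_length]; omega) (by rw [pvBitsW_length]; omega)
    simp only [Nat.cast_zero, List.drop_zero, ← hpairs] at henum
    rw [henum]
    rfl
  have hext := List.foldl_ext (fun (md : Option Int) (k : Nat) => pvStepA sour bitter n md (1 + (k : Int)))
      (fun (md : Option Int) (k : Nat) => pvG md (pvVal (pvInner ((pvBitsW n (k + 1)).zip pairs))))
      none hstep
  rw [hext]
  have hfold : (List.range (2 ^ n - 1)).foldl
      (fun md k => pvG md (pvVal (pvInner ((pvBitsW n (k + 1)).zip pairs)))) none
      = ((List.range (2 ^ n - 1)).map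
          (fun k => pvVal (pvInner ((pvBitsW n (k + 1)).zip pairs)))).foldl pvG none := by
    rw [List.foldl_map]
  rw [hfold]
  -- identify the mapped list with (pvF pairs).tail.map pvVal via pvMap_range
  have hmr := pvMap_range pairs
  rw [hplen] at hmr
  have hrs : List.range (2 ^ n) = 0 :: (List.range (2 ^ n - 1)).map Nat.succ := by
    have h1 : 2 ^ n = (2 ^ n - 1) + 1 := by omega
    conv_lhs => rw [h1]
    rw [List.range_succ_eq_map]
  rw [hrs] at hmr
  have htail : (pvF pairs).tail
      = (List.range (2 ^ n - 1)).map (fun k => pvInner ((pvBitsW n (k + 1)).zip pairs)) := by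
    rw [← hmr]
    simp only [List.map_cons, List.tail_cons, List.map_map]
    rfl
  rw [htail, List.map_map]
  rfl

-- ===== VERDICT (by name: the statement is the Claim_ definition above) =====
theorem compute_min_diff_spec : Claim_equal_compute_min_diff := by
  intro sour bitter _hdom hpre
  obtain ⟨hne, hle⟩ := hpre
  unfold Spec_compute_min_diff
  rw [pvA_char sour bitter hne hle, compute_min_diff_alt, pvB_char]
  have hperm : ((pvF (sour.zip bitter)).tail.map pvVal).Perm
      (((pvF (sour.zip bitter).reverse)).tail.map pvVal) := by
    refine List.Perm.map pvVal ?_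
    have h := pvF_perm (List.reverse_perm (sour.zip bitter)).symm
    have h1 := pvF_head (sour.zip bitter)
    have h2 := pvF_head (sour.zip bitter).reverse
    rw [h1, h2] at h
    exact h.cons_inv
  rw [pvG_perm hperm]
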